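-- pv_equiv track=rewrite | github.com/Snehaldb/Decision-Tree-Classifier | DecisionTreeClassifier.py | create_features_list
-- ===== SOURCE A (Python) =====
-- def create_features_list(feature_data, data):
--     feature_dic = {}
--     for i in range(len(feature_data)):
--         key = feature_data[i]
--         target = data[i]
--         if key in feature_dic:
--             target_dic = feature_dic[key]
--             if target in target_dic:
--                 val = target_dic[target]
--                 target_dic[target] = val + 1
--             else:
--                 target_dic[target] = 1
--         else:
--             my_dic = {target: 1}
--             feature_dic[key] = my_dic
--     return feature_dic
-- ===== SOURCE B (Python) =====
-- def _tally(targets):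
--     counts = {}
--     for t in targets:
--         counts[t] = counts.get(t, 0) + 1
--     return counts
--
--
-- def create_features_list(feature_data, data):
--     # pass 1: group targets by feature value
--     groups = {}
--     for key, target in zip(feature_data, data):
--         if key in groups:
--             groups[key].append(target)
--         else:
--             groups[key] = [target]
--     # pass 2: tally each group
--     return {key: _tally(targets) for key, targets in groups.items()}
-- ===== Notes on version B (the rewrite author's own statement) =====
-- stated objective: alternative
-- what changed: B replaces A's single index loop with find-or-create nested-dict increments by a two-pass build-groups-then-count: zip groups targets into lists per feature value, then each group is tallied into a count dict.
import Mathlib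
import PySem

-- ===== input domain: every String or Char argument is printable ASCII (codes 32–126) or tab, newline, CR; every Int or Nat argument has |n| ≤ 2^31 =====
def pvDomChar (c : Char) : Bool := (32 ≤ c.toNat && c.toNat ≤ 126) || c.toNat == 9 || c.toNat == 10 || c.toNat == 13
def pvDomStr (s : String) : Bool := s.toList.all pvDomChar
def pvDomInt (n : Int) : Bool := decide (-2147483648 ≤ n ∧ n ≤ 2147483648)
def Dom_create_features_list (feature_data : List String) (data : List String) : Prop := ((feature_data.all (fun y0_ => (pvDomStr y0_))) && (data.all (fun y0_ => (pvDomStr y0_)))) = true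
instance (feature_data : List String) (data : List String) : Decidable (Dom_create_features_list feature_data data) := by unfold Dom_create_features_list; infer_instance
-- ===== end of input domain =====

-- B builds the grouping index first and counts afterwards (two passes) instead of A's
-- single-pass find-or-create-then-increment on a nested dict (objective: alternative).
-- When data is shorter than feature_data, A raises IndexError (excluded by Pre_);
-- B's zip truncates, so B returns the grouping of the common prefix there.

-- ===== PORT A =====
-- one iteration of A's loop body (i is the loop index; the `| _, _ => d` branch is the
-- out-of-range lookup, unreachable under Pre_, where Python raises IndexError)
def cflA_step (feature_data : List String) (data : List String)
    (feature_dic : PySem.Dict String (PySem.Dict String Int)) (i : Int) :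
    PySem.Dict String (PySem.Dict String Int) :=
  match PySem.List.pyGet? feature_data i, PySem.List.pyGet? data i with
  | some key, some target =>
    match feature_dic.get? key with
    | some target_dic =>
      match target_dic.get? target with
      | some val => feature_dic.insert key (target_dic.insert target (val + 1))
      | none => feature_dic.insert key (target_dic.insert target 1)
    | none => feature_dic.insert key (PySem.Dict.ofList [(target, 1)])
  | _, _ => feature_dic

def create_features_list (feature_data : List String) (data : List String) :
    List (String × List (String × Int)) :=
  ((PySem.List.pyRange 0 (feature_data.length : Int) 1).foldl
      (cflA_step feature_data data) PySem.Dict.empty).items.map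
    (fun p => (p.1, p.2.items))

-- ===== PORT B =====
-- _tally: counts[t] = counts.get(t, 0) + 1 over the group
def cflB_tally (targets : List String) : PySem.Dict String Int :=
  targets.foldl (fun counts t => counts.insert t (counts.getD t 0 + 1)) PySem.Dict.empty

-- pass 1 loop body: append target under its feature value
def cflB_group (g : PySem.Dict String (List String)) (kt : String × String) :
    PySem.Dict String (List String) :=
  match g.get? kt.1 with
  | some ts => g.insert kt.1 (ts ++ [kt.2])
  | none => g.insert kt.1 [kt.2]

def create_features_list_alt (feature_data : List String) (data : List String) :
    List (String × List (String × Int)) :=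
  let groups := (feature_data.zip data).foldl cflB_group PySem.Dict.empty
  groups.items.map (fun p => (p.1, (cflB_tally p.2).items))

-- ===== PRECONDITION & SPEC =====
-- A indexes data[i] for every i < len(feature_data): it raises IndexError when data is shorter.
def Pre_create_features_list (feature_data : List String) (data : List String) : Prop :=
  feature_data.length ≤ data.length
instance (feature_data : List String) (data : List String) : Decidable (Pre_create_features_list feature_data data) := by unfold Pre_create_features_list; infer_instance

def pvWitness_create_features_list : List String × List String :=
  (["a", "b", "a"], ["x", "y", "x"])

def Spec_create_features_list (feature_data : List String) (data : List String) (out : List (String × List (String × Int))) : Prop := out = create_features_list_alt feature_data data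
instance (feature_data : List String) (data : List String) (out : List (String × List (String × Int))) : Decidable (Spec_create_features_list feature_data data out) := by unfold Spec_create_features_list; infer_instance

-- ===== CLAIM (what is proved, stated in full; the proofs are below) =====
def Claim_equal_create_features_list : Prop := ∀ (feature_data : List String) (data : List String), Dom_create_features_list feature_data data → Pre_create_features_list feature_data data → Spec_create_features_list feature_data data (create_features_list feature_data data)

-- ===== LEMMAS AND PROOFS =====

-- A's loop over zipped (key, target) pairs
def cflZ_step (d : PySem.Dict String (PySem.Dict String Int)) (kt : String × String) :
    PySem.Dict String (PySem.Dict String Int) :=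
  match d.get? kt.1 with
  | some td =>
    match td.get? kt.2 with
    | some v => d.insert kt.1 (td.insert kt.2 (v + 1))
    | none => d.insert kt.1 (td.insert kt.2 1)
  | none => d.insert kt.1 (PySem.Dict.ofList [(kt.2, 1)])

-- group dict mapped through the tally
def cflMapTally (g : PySem.Dict String (List String)) :
    PySem.Dict String (PySem.Dict String Int) :=
  PySem.Dict.mk (g.items.map (fun p => (p.1, cflB_tally p.2)))

lemma cfl_index_to_zip (feature_data data : List String)
    (h : feature_data.length ≤ data.length)
    (d : PySem.Dict String (PySem.Dict String Int)) :
    (PySem.List.pyRange 0 (feature_data.length : Int) 1).foldl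
      (cflA_step feature_data data) d = (feature_data.zip data).foldl cflZ_step d := by
  have hz : (feature_data.zip data).length = feature_data.length := by
    simp [List.length_zip]; omega
  have key : ∀ acc (i : Int), i ∈ PySem.List.pyRange 0 (feature_data.length : Int) 1 →
      cflA_step feature_data data acc i =
        cflZ_step acc (PySem.List.pyGetD (feature_data.zip data) i ("", "")) := by
    intro acc i hi
    rw [PySem.List.mem_pyRange_one] at hi
    have h1 : i.toNat < feature_data.length := by omega
    have h2 : i.toNat < data.length := by omega
    have h3 : i.toNat < (feature_data.zip data).length := by omega
    rw [PySem.List.pyGetD_eq_getElem _ ("", "") hi.1 (by omega)]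
    simp only [cflA_step, cflZ_step]
    rw [PySem.List.pyGet?_eq_some_getElem feature_data hi.1 (by exact_mod_cast hi.2),
        PySem.List.pyGet?_eq_some_getElem data hi.1 (by exact_mod_cast (by omega : i < (data.length : Int)))]
    simp [List.getElem_zip]
  rw [PySem.List.foldl_congr_mem _ _ _ _ key, ← hz,
      PySem.List.foldl_pyRange_zero_pyGetD' (feature_data.zip data) ("", "") cflZ_step d]

lemma cfl_get?_mapTally (g : PySem.Dict String (List String)) (k : String) :
    (cflMapTally g).get? k = (g.get? k).map cflB_tally := by
  obtain ⟨l⟩ := g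
  induction l with
  | nil => rfl
  | cons p l ih =>
    by_cases hk : p.1 == k
    · simp [cflMapTally, PySem.Dict.get?, List.find?, hk]
    · simp only [cflMapTally, PySem.Dict.get?, List.map_cons, List.find?, hk]
      simpa [cflMapTally, PySem.Dict.get?] using ih

lemma cfl_contains_mapTally (g : PySem.Dict String (List String)) (k : String) :
    (cflMapTally g).contains k = g.contains k := by
  obtain ⟨l⟩ := g
  simp [cflMapTally, PySem.Dict.contains, List.any_map, Function.comp_def]

lemma cfl_insert_mapTally (g : PySem.Dict String (List String)) (k : String) (ts : List String) :
    cflMapTally (g.insert k ts) = (cflMapTally g).insert k (cflB_tally ts) := by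
  simp only [PySem.Dict.insert, cfl_contains_mapTally]
  by_cases hc : g.contains k
  · simp only [hc, if_pos]
    apply congrArg PySem.Dict.mk
    simp only [cflMapTally, List.map_map]
    apply List.map_congr_left
    intro p _
    by_cases hk : p.1 = k <;> simp [hk]
  · simp [hc, cflMapTally]

lemma cfl_tally_snoc (ts : List String) (t : String) :
    cflB_tally (ts ++ [t]) = (cflB_tally ts).insert t ((cflB_tally ts).getD t 0 + 1) := by
  simp [cflB_tally, List.foldl_append]

lemma cfl_step_commute (g : PySem.Dict String (List String)) (kt : String × String) :
    cflZ_step (cflMapTally g) kt = cflMapTally (cflB_group g kt) := by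
  unfold cflZ_step cflB_group
  rw [cfl_get?_mapTally]
  cases hg : g.get? kt.1 with
  | none => simp [cfl_insert_mapTally, cflB_tally, PySem.Dict.ofList, PySem.Dict.update]
  | some ts =>
    simp only [Option.map_some]
    rw [cfl_insert_mapTally, cfl_tally_snoc]
    cases ht : (cflB_tally ts).get? kt.2 with
    | none => rw [PySem.Dict.getD_of_get?_eq_none _ _ ht]; simp
    | some v => rw [PySem.Dict.getD_of_get?_eq_some _ _ ht]

lemma cfl_fold_commute (zs : List (String × String)) (g : PySem.Dict String (List String)) :
    zs.foldl cflZ_step (cflMapTally g) = cflMapTally (zs.foldl cflB_group g) := by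
  induction zs generalizing g with
  | nil => rfl
  | cons kt zs ih => simp [List.foldl_cons, cfl_step_commute, ih]

-- ===== VERDICT (by name: the statement is the Claim_ definition above) =====
theorem create_features_list_spec : Claim_equal_create_features_list := by
  intro feature_data data _ hpre
  unfold Spec_create_features_list create_features_list create_features_list_alt
  rw [cfl_index_to_zip feature_data data hpre]
  have h0 : (PySem.Dict.empty : PySem.Dict String (PySem.Dict String Int)) =
      cflMapTally PySem.Dict.empty := rfl
  rw [h0, cfl_fold_commute]
  simp [cflMapTally, List.map_map, Function.comp_def]
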